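-- pv_equiv track=rewrite | github.com/hiterharris/cs-module-project-hash-tables | applications/expensive_seq/expensive_seq.py | expensive_seq
-- ===== SOURCE A (Python) =====
-- computed_results = dict()
--
-- def expensive_seq(x, y, z):
--
--     if x <= 0:
--         return y + z
--
--     else:
--
--         if (x-1,y+1,z) in computed_results:
--             addend1 = computed_results[(x-1,y+1,z)]
--         else:
--             addend1 = expensive_seq(x-1,y+1,z)
--             computed_results[(x-1,y+1,z)] = addend1
--
--         if (x-2,y+2,z*2) in computed_results:
--             addend2 = computed_results[(x-2,y+2,z*2)]
--         else:
--             addend2 = expensive_seq(x-2,y+2,z*2)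
--             computed_results[(x-2,y+2,z*2)] = addend2
--
--         if (x-3,y+3,z*3) in computed_results:
--             addend3 = computed_results[(x-3,y+3,z*3)]
--         else:
--             addend3 = expensive_seq(x-3,y+3,z*3)
--             computed_results[(x-3,y+3,z*3)] = addend3
--
--     result = addend1 + addend2 + addend3
--     computed_results[(x, y, z)] = result
--
--     return result
-- ===== SOURCE B (Python) =====
-- def expensive_seq(x, y, z):
--     # f(x,y,z) is linear in y and z: f = P(x)*y + R(x)*z + C(x).
--     # Compute the coefficient triples bottom-up in one O(x) pass.
--     t3 = (1, 1, 0)  # triple for x-3 (any argument <= 0 has P=R=1, C=0)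
--     t2 = (1, 1, 0)
--     t1 = (1, 1, 0)
--     for _ in range(x):
--         p1, r1, c1 = t1
--         p2, r2, c2 = t2
--         p3, r3, c3 = t3
--         t1, t2, t3 = (p1 + p2 + p3,
--                       r1 + 2 * r2 + 3 * r3,
--                       c1 + p1 + c2 + 2 * p2 + c3 + 3 * p3), t1, t2
--     p, r, c = t1
--     return p * y + r * z + c
-- ===== Notes on version B (the rewrite author's own statement) =====
-- stated objective: faster
-- what changed: Replaced the memoized 3-way recursion with a closed linear-algebra view: the result is linear in y and z, so B computes the coefficient triples (P,R,C) by a single bottom-up O(x) loop and returns P*y+R*z+C.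
import Mathlib
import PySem

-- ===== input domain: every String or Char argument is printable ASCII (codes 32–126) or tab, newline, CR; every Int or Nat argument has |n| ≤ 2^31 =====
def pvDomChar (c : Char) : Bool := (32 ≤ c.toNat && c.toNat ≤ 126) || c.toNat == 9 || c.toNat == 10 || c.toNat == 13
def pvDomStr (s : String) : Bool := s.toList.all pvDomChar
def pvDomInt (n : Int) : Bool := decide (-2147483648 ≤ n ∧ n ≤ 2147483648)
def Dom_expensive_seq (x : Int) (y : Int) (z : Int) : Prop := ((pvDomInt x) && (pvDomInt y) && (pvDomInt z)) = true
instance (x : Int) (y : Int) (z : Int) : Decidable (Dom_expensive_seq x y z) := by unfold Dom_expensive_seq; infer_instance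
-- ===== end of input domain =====

-- B computes the same value by a single O(x) coefficient-recurrence loop (result is linear in y,z)
-- instead of A's memoized 3-way recursion; equivalence is about the RETURN value — A also fills a
-- module-level cache `computed_results` (a pure memo: every stored entry equals the recursive value),
-- which the port models by threading a dict (Std.TreeMap, an ordered map with the same lookup/insert
-- semantics) that starts empty at each top-level call.

-- ===== PORT A =====
-- key comparison for the memo dict (Python dict keyed by the (x,y,z) tuple; an ordered map here
-- because the z components grow by factors of 2, which degrades Lean's built-in Int hashing)
def cmp3 : (Int × Int × Int) → (Int × Int × Int) → Ordering :=
  compareLex (compareOn (·.1)) (compareLex (compareOn (·.2.1)) (compareOn (·.2.2)))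

-- literal transliteration of A: the three memo-checked recursive summands, threading the cache dict
def esAgo (x : Int) (y : Int) (z : Int) (m : Std.TreeMap (Int × Int × Int) Int cmp3) :
    Int × Std.TreeMap (Int × Int × Int) Int cmp3 :=
  if x ≤ 0 then (y + z, m)
  else
    let (a1, m1) :=
      match m[((x - 1, y + 1, z) : Int × Int × Int)]? with
      | some v => (v, m)
      | none =>
        let (v, m') := esAgo (x - 1) (y + 1) z m
        (v, m'.insert (x - 1, y + 1, z) v)
    let (a2, m2) :=
      match m1[((x - 2, y + 2, z * 2) : Int × Int × Int)]? with
      | some v => (v, m1)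
      | none =>
        let (v, m') := esAgo (x - 2) (y + 2) (z * 2) m1
        (v, m'.insert (x - 2, y + 2, z * 2) v)
    let (a3, m3) :=
      match m2[((x - 3, y + 3, z * 3) : Int × Int × Int)]? with
      | some v => (v, m2)
      | none =>
        let (v, m') := esAgo (x - 3) (y + 3) (z * 3) m2
        (v, m'.insert (x - 3, y + 3, z * 3) v)
    let r := a1 + a2 + a3
    (r, m3.insert (x, y, z) r)
termination_by x.toNat
decreasing_by all_goals omega

def expensive_seq (x : Int) (y : Int) (z : Int) : Int :=
  (esAgo x y z ∅).1

-- ===== PORT B =====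
-- the loop state: the coefficient triples (P,R,C) for x, x-1, x-2
def altLoop : Nat → ((Int × Int × Int) × (Int × Int × Int) × (Int × Int × Int))
  | 0 => ((1, 1, 0), (1, 1, 0), (1, 1, 0))
  | n + 1 =>
    let t := altLoop n
    ((t.1.1 + t.2.1.1 + t.2.2.1,
      t.1.2.1 + 2 * t.2.1.2.1 + 3 * t.2.2.2.1,
      t.1.2.2 + t.1.1 + t.2.1.2.2 + 2 * t.2.1.1 + t.2.2.2.2 + 3 * t.2.2.1),
     t.1, t.2.1)

def expensive_seq_alt (x : Int) (y : Int) (z : Int) : Int :=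
  (altLoop x.toNat).1.1 * y + (altLoop x.toNat).1.2.1 * z + (altLoop x.toNat).1.2.2

-- ===== PRECONDITION & SPEC =====
-- Python A recurses to depth x before anything returns, so calls with large x raise RecursionError
-- (under the harness's recursion limit of 10000; CPython's default is 1000); Pre_ excludes that
-- region, with a margin of interpreter frames below the limit. A raises there and returns nowhere
-- else; the ports themselves are total.
def Pre_expensive_seq (x : Int) (y : Int) (z : Int) : Prop := x < 9950
instance (x : Int) (y : Int) (z : Int) : Decidable (Pre_expensive_seq x y z) := by unfold Pre_expensive_seq; infer_instance
def pvWitness_expensive_seq : Int × Int × Int := (5, 2, 3)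

def Spec_expensive_seq (x : Int) (y : Int) (z : Int) (out : Int) : Prop := out = expensive_seq_alt x y z
instance (x : Int) (y : Int) (z : Int) (out : Int) : Decidable (Spec_expensive_seq x y z out) := by unfold Spec_expensive_seq; infer_instance

-- ===== CLAIM (what is proved, stated in full; the proofs are below) =====
def Claim_equal_expensive_seq : Prop := ∀ (x : Int) (y : Int) (z : Int), Dom_expensive_seq x y z → Pre_expensive_seq x y z → Spec_expensive_seq x y z (expensive_seq x y z)

-- ===== LEMMAS AND PROOFS =====

lemma cmp3_eq (a b : Int × Int × Int) : cmp3 a b = .eq ↔ a = b := by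
  simp [cmp3, compareLex, compareOn, Ordering.then_eq_eq, Prod.ext_iff]

lemma altLoop_shift2 (n : Nat) : (altLoop (n - 1)).1 = (altLoop n).2.1 := by
  cases n <;> rfl

lemma altLoop_shift3 (n : Nat) : (altLoop (n - 2)).1 = (altLoop n).2.2 := by
  cases n with
  | zero => rfl
  | succ n =>
    have : n + 1 - 2 = n - 1 := by omega
    rw [this, altLoop_shift2]
    rfl

-- B satisfies A's recurrence
lemma alt_rec (x y z : Int) : expensive_seq_alt x y z =
    if x ≤ 0 then y + z
    else expensive_seq_alt (x - 1) (y + 1) z + expensive_seq_alt (x - 2) (y + 2) (z * 2) +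
         expensive_seq_alt (x - 3) (y + 3) (z * 3) := by
  by_cases hx : x ≤ 0
  · have h0 : x.toNat = 0 := by omega
    simp [expensive_seq_alt, h0, hx, altLoop]
  · have hm : x.toNat = (x - 1).toNat + 1 := by omega
    have h2 : (x - 2).toNat = (x - 1).toNat - 1 := by omega
    have h3 : (x - 3).toNat = (x - 1).toNat - 2 := by omega
    simp only [expensive_seq_alt, hx, if_false, hm, h2, h3]
    rw [altLoop_shift2, altLoop_shift3]
    simp only [altLoop]
    ring

def GoodMemo (m : Std.TreeMap (Int × Int × Int) Int cmp3) : Prop :=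
  ∀ (k : Int × Int × Int) (v : Int), m[k]? = some v → v = expensive_seq_alt k.1 k.2.1 k.2.2

lemma GoodMemo_insert {m : Std.TreeMap (Int × Int × Int) Int cmp3} {k : Int × Int × Int} {v : Int}
    (hm : GoodMemo m) (hv : v = expensive_seq_alt k.1 k.2.1 k.2.2) : GoodMemo (m.insert k v) := by
  intro k' v' h
  haveI : Std.TransCmp cmp3 := by unfold cmp3; infer_instance
  rw [Std.TreeMap.getElem?_insert] at h
  split at h
  · rename_i hk; cases h; exact ((cmp3_eq k k').mp hk) ▸ hv
  · exact hm k' v' h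

-- one memo-checked summand
lemma fetch_correct (a b c : Int) (m : Std.TreeMap (Int × Int × Int) Int cmp3) (hm : GoodMemo m)
    (hrec : GoodMemo m → (esAgo a b c m).1 = expensive_seq_alt a b c ∧ GoodMemo (esAgo a b c m).2)
    (r : Int) (mr : Std.TreeMap (Int × Int × Int) Int cmp3)
    (h : (match m[((a, b, c) : Int × Int × Int)]? with
          | some v => (v, m)
          | none =>
            let (v, m') := esAgo a b c m
            (v, m'.insert (a, b, c) v)) = (r, mr)) :
    r = expensive_seq_alt a b c ∧ GoodMemo mr := by
  obtain ⟨h1, h2⟩ := hrec hm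
  cases hg : m[((a, b, c) : Int × Int × Int)]? with
  | some v =>
    rw [hg] at h
    cases h
    exact ⟨hm _ _ hg, hm⟩
  | none =>
    rw [hg] at h
    revert h
    rcases hp : esAgo a b c m with ⟨v, mm⟩
    rw [hp] at h1 h2
    intro h
    cases h
    exact ⟨h1, GoodMemo_insert h2 h1⟩

lemma esAgo_correct : ∀ (n : Nat) (x y z : Int) (m : Std.TreeMap (Int × Int × Int) Int cmp3),
    x.toNat ≤ n → GoodMemo m →
    (esAgo x y z m).1 = expensive_seq_alt x y z ∧ GoodMemo (esAgo x y z m).2 := by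
  intro n
  induction n with
  | zero =>
    intro x y z m hn hm
    have hx : x ≤ 0 := by omega
    rw [esAgo, if_pos hx]
    exact ⟨by rw [alt_rec, if_pos hx], hm⟩
  | succ n ih =>
    intro x y z m hn hm
    by_cases hx : x ≤ 0
    · rw [esAgo, if_pos hx]
      exact ⟨by rw [alt_rec, if_pos hx], hm⟩
    · rw [esAgo, if_neg hx]
      rcases hq1 : (match m[((x - 1, y + 1, z) : Int × Int × Int)]? with
          | some v => (v, m)
          | none =>
            let (v, m') := esAgo (x - 1) (y + 1) z m
            (v, m'.insert (x - 1, y + 1, z) v)) with ⟨a1, m1⟩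
      obtain ⟨ha1, hm1⟩ := fetch_correct (x - 1) (y + 1) z m hm
        (fun h => ih (x - 1) (y + 1) z m (by omega) h) a1 m1 hq1
      rcases hq2 : (match m1[((x - 2, y + 2, z * 2) : Int × Int × Int)]? with
          | some v => (v, m1)
          | none =>
            let (v, m') := esAgo (x - 2) (y + 2) (z * 2) m1
            (v, m'.insert (x - 2, y + 2, z * 2) v)) with ⟨a2, m2⟩
      obtain ⟨ha2, hm2⟩ := fetch_correct (x - 2) (y + 2) (z * 2) m1 hm1
        (fun h => ih (x - 2) (y + 2) (z * 2) m1 (by omega) h) a2 m2 hq2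
      rcases hq3 : (match m2[((x - 3, y + 3, z * 3) : Int × Int × Int)]? with
          | some v => (v, m2)
          | none =>
            let (v, m') := esAgo (x - 3) (y + 3) (z * 3) m2
            (v, m'.insert (x - 3, y + 3, z * 3) v)) with ⟨a3, m3⟩
      obtain ⟨ha3, hm3⟩ := fetch_correct (x - 3) (y + 3) (z * 3) m2 hm2
        (fun h => ih (x - 3) (y + 3) (z * 3) m2 (by omega) h) a3 m3 hq3
      have hr : a1 + a2 + a3 = expensive_seq_alt x y z := by
        rw [ha1, ha2, ha3, alt_rec x y z, if_neg hx]
      constructor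
      · dsimp only
        rw [hq1]
        dsimp only
        rw [hq2]
        dsimp only
        rw [hq3]
        exact hr
      · dsimp only
        rw [hq1]
        dsimp only
        rw [hq2]
        dsimp only
        rw [hq3]
        exact GoodMemo_insert hm3 hr

-- ===== VERDICT (by name: the statement is the Claim_ definition above) =====
theorem expensive_seq_spec : Claim_equal_expensive_seq := by
  intro x y z _ _
  unfold Spec_expensive_seq expensive_seq
  have h := esAgo_correct x.toNat x y z ∅ le_rfl
    (by
      haveI : Std.TransCmp cmp3 := by unfold cmp3; infer_instance
      intro k v h
      rw [Std.TreeMap.getElem?_of_isEmpty rfl] at h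
      exact (Option.some_ne_none v h.symm).elim)
  exact h.1
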